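-- pv_equiv track=rewrite | github.com/angadsingh2/physical-design | floorplanning/hierarchical_approach.py | hierarchical_floorplan
-- ===== SOURCE A (Python) =====
-- blocks = {
--     "A": (4, 3),
--     "B": (3, 2),
--     "C": (5, 2),
--     "D": (2, 4),
--     "E": (3, 3),
--     "F": (2, 2)
-- }
--
-- def hierarchical_floorplan(modules, x=0, y=0):
--     # Base case
--     if len(modules) == 1:
--         m = modules[0]
--         return {m: (x, y)}, blocks[m][0], blocks[m][1]
--
--     # Divide
--     mid = len(modules) // 2
--     left = modules[:mid]
--     right = modules[mid:]
--
--     # Solve recursively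
--     place_left, w1, h1 = hierarchical_floorplan(left, x, y)
--     place_right, w2, h2 = hierarchical_floorplan(right, x + w1, y)
--
--     # Merge side by side
--     placements = {}
--     placements.update(place_left)
--     placements.update(place_right)
--
--     total_w = w1 + w2
--     total_h = max(h1, h2)
--
--     return placements, total_w, total_h
-- ===== SOURCE B (Python) =====
-- blocks = {
--     "A": (4, 3),
--     "B": (3, 2),
--     "C": (5, 2),
--     "D": (2, 4),
--     "E": (3, 3),
--     "F": (2, 2)
-- }
--
-- def hierarchical_floorplan(modules, x=0, y=0):
--     # Single left-to-right sweep instead of recursive divide-and-merge.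
--     placements = {}
--     cum_x = x
--     total_h = 0
--     for m in modules:
--         w, h = blocks[m]
--         placements[m] = (cum_x, y)
--         cum_x += w
--         if h > total_h:
--             total_h = h
--     return placements, cum_x - x, total_h
-- ===== Notes on version B (the rewrite author's own statement) =====
-- stated objective: simpler
-- what changed: Replaced the recursive binary divide-and-merge (which rebuilds and merges placement dicts at every recursion level) with a single left-to-right loop accumulating the placements, the running x offset and the running max height.
-- outside the precondition, e.g. on hierarchical_floorplan([], 0, 0): A raises RecursionError, B returns ({}, 0, 0)
import Mathlib
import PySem

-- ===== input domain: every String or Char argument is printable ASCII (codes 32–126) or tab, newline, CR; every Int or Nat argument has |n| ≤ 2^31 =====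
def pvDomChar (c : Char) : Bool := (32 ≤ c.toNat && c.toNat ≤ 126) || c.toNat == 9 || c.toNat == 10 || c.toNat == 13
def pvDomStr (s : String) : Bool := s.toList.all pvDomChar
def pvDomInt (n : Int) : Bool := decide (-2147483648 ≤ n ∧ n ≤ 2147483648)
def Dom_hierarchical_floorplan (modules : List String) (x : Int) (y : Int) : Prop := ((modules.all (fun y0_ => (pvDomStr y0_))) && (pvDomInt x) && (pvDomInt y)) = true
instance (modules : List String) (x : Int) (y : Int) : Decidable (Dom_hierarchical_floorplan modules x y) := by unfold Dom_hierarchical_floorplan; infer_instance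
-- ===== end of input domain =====

-- B replaces A's recursive binary divide-and-merge by a single left-to-right fold
-- (same placements, width and height); objective: simpler (one plain loop, no dict merging).


-- ===== PORT A =====
-- the module-level 'blocks' dict
def pvBlocks : PySem.Dict String (Int × Int) :=
  PySem.Dict.ofList [("A", (4, 3)), ("B", (3, 2)), ("C", (5, 2)), ("D", (2, 4)), ("E", (3, 3)), ("F", (2, 2))]

-- blocks[m]; Python raises KeyError on a missing key — Pre_ excludes that, the default is never reached there
def pvBlock (m : String) : Int × Int := (pvBlocks.get? m).getD (0, 0)

-- the recursive divide-and-merge, returning the placements dict with width and height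
def hierFP (modules : List String) (x : Int) (y : Int) :
    PySem.Dict String (Int × Int) × Int × Int :=
  if modules.length = 1 then
    match modules with
    | m :: _ => (PySem.Dict.empty.insert m (x, y), (pvBlock m).1, (pvBlock m).2)
    | [] => (PySem.Dict.empty, 0, 0)   -- unreachable (length = 1)
  else if modules.length = 0 then
    (PySem.Dict.empty, 0, 0)   -- totality guard: Python recurses forever here; excluded by Pre_
  else
    let mid := modules.length / 2
    let left := modules.take mid
    let right := modules.drop mid
    let r1 := hierFP left x y
    let r2 := hierFP right (x + r1.2.1) y
    ((PySem.Dict.empty.update r1.1.items).update r2.1.items, r1.2.1 + r2.2.1, max r1.2.2 r2.2.2)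
termination_by modules.length
decreasing_by
  · simp only [List.length_take]; omega
  · simp only [List.length_drop]; omega

def hierarchical_floorplan (modules : List String) (x : Int) (y : Int) :
    (List (String × Int × Int)) × Int × Int :=
  let r := hierFP modules x y
  (r.1.items, r.2)

-- ===== PORT B =====
-- one step of the left-to-right sweep: state = (placements, cum_x, total_h)
def floorStep (y : Int) (st : PySem.Dict String (Int × Int) × Int × Int) (m : String) :
    PySem.Dict String (Int × Int) × Int × Int :=
  (st.1.insert m (st.2.1, y), st.2.1 + (pvBlock m).1,
   if (pvBlock m).2 > st.2.2 then (pvBlock m).2 else st.2.2)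

def hierarchical_floorplan_alt (modules : List String) (x : Int) (y : Int) :
    (List (String × Int × Int)) × Int × Int :=
  let st := modules.foldl (floorStep y) (PySem.Dict.empty, x, 0)
  (st.1.items, st.2.1 - x, st.2.2)

-- ===== PRECONDITION & SPEC =====
-- Pre_ excludes exactly the inputs where the Python A raises: [] (infinite recursion,
-- RecursionError) and any module name outside 'blocks' (KeyError).
def Pre_hierarchical_floorplan (modules : List String) (x : Int) (y : Int) : Prop :=
  modules ≠ [] ∧ ∀ m ∈ modules, pvBlocks.contains m = true
instance (modules : List String) (x : Int) (y : Int) : Decidable (Pre_hierarchical_floorplan modules x y) := by unfold Pre_hierarchical_floorplan; infer_instance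

def pvWitness_hierarchical_floorplan : List String × Int × Int := (["B", "A", "B"], 2, -1)

def Spec_hierarchical_floorplan (modules : List String) (x : Int) (y : Int) (out : (List (String × Int × Int)) × Int × Int) : Prop := out = hierarchical_floorplan_alt modules x y
instance (modules : List String) (x : Int) (y : Int) (out : (List (String × Int × Int)) × Int × Int) : Decidable (Spec_hierarchical_floorplan modules x y out) := by unfold Spec_hierarchical_floorplan; infer_instance

-- ===== CLAIM (what is proved, stated in full; the proofs are below) =====
def Claim_equal_hierarchical_floorplan : Prop := ∀ (modules : List String) (x : Int) (y : Int), Dom_hierarchical_floorplan modules x y → Pre_hierarchical_floorplan modules x y → Spec_hierarchical_floorplan modules x y (hierarchical_floorplan modules x y)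
-- ===== LEMMAS AND PROOFS =====

-- the pairs B inserts, with their x offsets
def pvPairs (y : Int) : List String → Int → List (String × Int × Int)
  | [], _ => []
  | m :: ms, c => (m, (c, y)) :: pvPairs y ms (c + (pvBlock m).1)

def pvW (ms : List String) : Int := (ms.map (fun m => (pvBlock m).1)).sum

def pvH (t : Int) (ms : List String) : Int :=
  ms.foldl (fun a m => if (pvBlock m).2 > a then (pvBlock m).2 else a) t

lemma pvBlock_snd_nonneg (m : String) : 0 ≤ (pvBlock m).2 := by
  simp only [pvBlock, pvBlocks, PySem.Dict.ofList, PySem.Dict.update, List.foldl,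
    PySem.Dict.get?_insert, PySem.Dict.get?_empty]
  split_ifs <;> simp

lemma foldl_floorStep (y : Int) (ms : List String) :
    ∀ (d : PySem.Dict String (Int × Int)) (c t : Int),
    ms.foldl (floorStep y) (d, c, t) = (d.update (pvPairs y ms c), c + pvW ms, pvH t ms) := by
  induction ms with
  | nil => intro d c t; simp [pvPairs, pvW, pvH, PySem.Dict.update]
  | cons m ms ih =>
    intro d c t
    show ms.foldl (floorStep y) (floorStep y (d, c, t) m) = _
    rw [show floorStep y (d, c, t) m = (d.insert m (c, y), c + (pvBlock m).1,
      if (pvBlock m).2 > t then (pvBlock m).2 else t) from rfl, ih]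
    refine Prod.ext ?_ (Prod.ext ?_ ?_)
    · rfl
    · show c + (pvBlock m).1 + pvW ms = c + pvW (m :: ms)
      simp [pvW]; ring
    · rfl

lemma pvPairs_append (y : Int) (L : List String) : ∀ (R : List String) (c : Int),
    pvPairs y (L ++ R) c = pvPairs y L c ++ pvPairs y R (c + pvW L) := by
  induction L with
  | nil => intro R c; simp [pvPairs, pvW]
  | cons m L ih =>
    intro R c
    have hw : c + pvW (m :: L) = (c + (pvBlock m).1) + pvW L := by simp [pvW]; ring
    simp only [List.cons_append, pvPairs, ih, hw]

lemma pvH_le (ms : List String) : ∀ (t : Int), t ≤ pvH t ms := by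
  induction ms with
  | nil => intro t; simp [pvH]
  | cons m ms ih =>
    intro t
    show t ≤ pvH (if (pvBlock m).2 > t then (pvBlock m).2 else t) ms
    by_cases h : (pvBlock m).2 > t
    · simp only [if_pos h]; exact le_trans (le_of_lt h) (ih _)
    · simp only [if_neg h]; exact ih t

lemma pvH_shift (ms : List String) : ∀ (t u : Int), pvH (max t u) ms = max t (pvH u ms) := by
  induction ms with
  | nil => intro t u; simp [pvH]
  | cons m ms ih =>
    intro t u
    show pvH (if (pvBlock m).2 > max t u then (pvBlock m).2 else max t u) ms = _
    have h1 : (if (pvBlock m).2 > max t u then (pvBlock m).2 else max t u)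
        = max t (if (pvBlock m).2 > u then (pvBlock m).2 else u) := by
      split_ifs <;> omega
    rw [h1, ih]
    rfl

-- d.update l2 after building l1 = one update with l1 ++ l2 (definitional foldl_append)
lemma dict_get?_update {κ ν : Type} [BEq κ] [LawfulBEq κ] [DecidableEq κ]
    (l : List (κ × ν)) : ∀ (d : PySem.Dict κ ν) (k : κ),
    (d.update l).get? k = ((PySem.Dict.ofList l).get? k).or (d.get? k) := by
  induction l with
  | nil => intro d k; simp [PySem.Dict.update, PySem.Dict.ofList, PySem.Dict.get?_empty]
  | cons p l ih =>
    intro d k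
    have h1 : (d.update (p :: l)) = (d.insert p.1 p.2).update l := rfl
    have h2 : (PySem.Dict.ofList (p :: l)) = (PySem.Dict.empty.insert p.1 p.2).update l := rfl
    rw [h1, h2, ih, ih, Option.or_assoc]
    congr 1
    rw [PySem.Dict.get?_insert, PySem.Dict.get?_insert, PySem.Dict.get?_empty]
    split_ifs <;> simp

lemma dict_ofList_items {κ ν : Type} [BEq κ] [LawfulBEq κ]
    (d : PySem.Dict κ ν) (hnd : d.keys.Nodup) : PySem.Dict.ofList d.items = d := by
  apply PySem.Dict.ext
  have := PySem.Dict.items_foldl_insert_fresh (l := d.items) (k := Prod.fst) (v := Prod.snd)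
    (d := PySem.Dict.empty) (by intro a _; exact PySem.Dict.contains_empty _) hnd
  simpa [PySem.Dict.ofList, PySem.Dict.update] using this

lemma dict_keys_update {κ ν : Type} [BEq κ] [LawfulBEq κ]
    (d : PySem.Dict κ ν) (l : List (κ × ν)) :
    (d.update l).keys = PySem.Set.update d.keys (l.map Prod.fst) := by
  have := PySem.Dict.keys_foldl_insert_key (l := l) (key := Prod.fst) (f := fun _ x => x.2) (d := d)
  simpa [PySem.Dict.update] using this

lemma set_update_ofList {α : Type} [BEq α] [LawfulBEq α] (s : PySem.Set α) (xs : List α) :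
    PySem.Set.update s (PySem.Set.ofList xs) = PySem.Set.update s xs := by
  rw [PySem.Set.update_eq_append_filter, PySem.Set.update_eq_append_filter,
    PySem.Set.ofList_ofList]

-- updating with a dict built from l equals updating with l itself
lemma dict_update_ofList_items {κ ν : Type} [BEq κ] [LawfulBEq κ] [DecidableEq κ]
    (d : PySem.Dict κ ν) (l : List (κ × ν)) (hnd : d.keys.Nodup) (v0 : ν) :
    d.update (PySem.Dict.ofList l).items = d.update l := by
  have hofk : (PySem.Dict.ofList l).keys = PySem.Set.ofList (l.map Prod.fst) := by
    have h := dict_keys_update (PySem.Dict.empty : PySem.Dict κ ν) l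
    rw [show (PySem.Dict.empty : PySem.Dict κ ν).keys = [] from rfl,
      PySem.Set.update_nil_left] at h
    exact h
  have hk : (d.update (PySem.Dict.ofList l).items).keys = (d.update l).keys := by
    rw [dict_keys_update, dict_keys_update,
      show (PySem.Dict.ofList l).items.map Prod.fst = (PySem.Dict.ofList l).keys from rfl,
      hofk, set_update_ofList]
  have hg : ∀ k, (d.update (PySem.Dict.ofList l).items).get? k = (d.update l).get? k := by
    intro k
    rw [dict_get?_update, dict_get?_update,
      dict_ofList_items (PySem.Dict.ofList l) (PySem.Dict.nodup_keys_ofList l)]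
  apply PySem.Dict.ext
  rw [PySem.Dict.items_eq_map_keys _ (PySem.Dict.nodup_keys_update d _ hnd) v0,
      PySem.Dict.items_eq_map_keys _ (PySem.Dict.nodup_keys_update d l hnd) v0, hk]
  apply List.map_congr_left
  intro k _
  rw [PySem.Dict.getD_eq_get?_getD, PySem.Dict.getD_eq_get?_getD, hg]

-- A's divide-and-merge computes exactly B's sweep result
lemma hierFP_eq (n : ℕ) : ∀ (ms : List String) (x y : Int), ms.length ≤ n → ms ≠ [] →
    hierFP ms x y = (PySem.Dict.ofList (pvPairs y ms x), pvW ms, pvH 0 ms) := by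
  induction n with
  | zero => intro ms x y hlen hne; cases ms with
    | nil => exact absurd rfl hne
    | cons m ms => simp at hlen
  | succ n ih =>
    intro ms x y hlen hne
    by_cases h1 : ms.length = 1
    · obtain ⟨m, rfl⟩ := List.length_eq_one_iff.mp h1
      rw [hierFP]
      simp only [List.length_cons, List.length_nil, if_pos]
      have hb := pvBlock_snd_nonneg m
      refine Prod.ext rfl (Prod.ext ?_ ?_)
      · simp [pvW]
      · show (pvBlock m).2 = pvH 0 [m]
        simp only [pvH, List.foldl]
        split_ifs <;> omega
    · have h0 : ms.length ≠ 0 := by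
        intro h; exact hne (List.eq_nil_of_length_eq_zero h)
      have hlen2 : 2 ≤ ms.length := by omega
      set mid := ms.length / 2 with hmid
      have hmid1 : 1 ≤ mid := by omega
      have hmidlt : mid < ms.length := by omega
      have hLlen : (ms.take mid).length ≤ n := by simp [List.length_take]; omega
      have hRlen : (ms.drop mid).length ≤ n := by simp [List.length_drop]; omega
      have hLne : ms.take mid ≠ [] := by
        intro h
        have h' : (ms.take mid).length = 0 := by rw [h]; rfl
        rw [List.length_take] at h'
        omega
      have hRne : ms.drop mid ≠ [] := by
        intro h
        have h' : (ms.drop mid).length = 0 := by rw [h]; rfl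
        rw [List.length_drop] at h'
        omega
      rw [hierFP.eq_def]
      simp only [if_neg h1, if_neg h0]
      rw [ih (ms.take mid) x y hLlen hLne]
      simp only
      rw [ih (ms.drop mid) (x + pvW (ms.take mid)) y hRlen hRne]
      have hupd : ∀ (d : PySem.Dict String (Int × Int)) (a b : List (String × Int × Int)),
          d.update (a ++ b) = (d.update a).update b := by
        intro d a b; simp [PySem.Dict.update, List.foldl_append]
      have hsplit : pvPairs y ms x
          = pvPairs y (ms.take mid) x ++ pvPairs y (ms.drop mid) (x + pvW (ms.take mid)) := by
        conv_lhs => rw [← List.take_append_drop mid ms]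
        exact pvPairs_append y (ms.take mid) (ms.drop mid) x
      refine Prod.ext ?_ (Prod.ext ?_ ?_)
      · show (PySem.Dict.empty.update
            (PySem.Dict.ofList (pvPairs y (ms.take mid) x)).items).update
            (PySem.Dict.ofList (pvPairs y (ms.drop mid) (x + pvW (ms.take mid)))).items
          = PySem.Dict.ofList (pvPairs y ms x)
        rw [dict_update_ofList_items PySem.Dict.empty (pvPairs y (ms.take mid) x)
          List.nodup_nil (0, 0)]
        rw [dict_update_ofList_items (PySem.Dict.empty.update (pvPairs y (ms.take mid) x))
          (pvPairs y (ms.drop mid) (x + pvW (ms.take mid)))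
          (PySem.Dict.nodup_keys_ofList (pvPairs y (ms.take mid) x)) (0, 0)]
        rw [hsplit]
        exact (hupd _ _ _).symm
      · show pvW (ms.take mid) + pvW (ms.drop mid) = pvW ms
        conv_rhs => rw [← List.take_append_drop mid ms]
        simp [pvW]
      · show max (pvH 0 (ms.take mid)) (pvH 0 (ms.drop mid)) = pvH 0 ms
        have hfold : pvH 0 ms = pvH (pvH 0 (ms.take mid)) (ms.drop mid) := by
          simp only [pvH]
          conv_lhs => rw [← List.take_append_drop mid ms]
          rw [List.foldl_append]
        have hmax : pvH (pvH 0 (ms.take mid)) (ms.drop mid)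
            = max (pvH 0 (ms.take mid)) (pvH 0 (ms.drop mid)) := by
          conv_lhs => rw [show pvH 0 (ms.take mid) = max (pvH 0 (ms.take mid)) 0 from
            (max_eq_left (pvH_le _ 0)).symm]
          exact pvH_shift _ _ _
        rw [hfold, hmax]
-- ===== VERDICT (by name: the statement is the Claim_ definition above) =====
theorem hierarchical_floorplan_spec : Claim_equal_hierarchical_floorplan := by
  intro ms x y _ hpre
  unfold Spec_hierarchical_floorplan
  have hA := hierFP_eq ms.length ms x y le_rfl hpre.1
  simp only [hierarchical_floorplan, hierarchical_floorplan_alt, hA, foldl_floorStep]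
  refine Prod.ext rfl (Prod.ext ?_ rfl)
  show pvW ms = x + pvW ms - x
  ring
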